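-- pv_equiv track=rewrite | github.com/BDBP106-LinuxAndPython-2025/Kambale-Nilesh | Python/Lab17/question11.py | magical_date
-- ===== SOURCE A (Python) =====
-- def magical_date(a, b, c):
--     l4=[]
--     for i in a:
--         for j in b:
--             for k in c:
--                 if i*j == (k%100):
--                     f=f"{i} {j} {k}"
--                     l4.append(f)
--
--     return l4
-- ===== SOURCE B (Python) =====
-- def magical_date(a, b, c):
--     idx = {}
--     for k in c:
--         idx.setdefault(k % 100, []).append(k)
--     l4 = []
--     for i in a:
--         for j in b:
--             for k in idx.get(i * j, []):
--                 l4.append(f"{i} {j} {k}")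
--     return l4
-- ===== Notes on version B (the rewrite author's own statement) =====
-- stated objective: faster
-- what changed: B indexes c once by k%100 into a dict of value-lists, then for each (i,j) pair looks up i*j directly instead of scanning all of c, removing the innermost full scan.
import Mathlib
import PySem

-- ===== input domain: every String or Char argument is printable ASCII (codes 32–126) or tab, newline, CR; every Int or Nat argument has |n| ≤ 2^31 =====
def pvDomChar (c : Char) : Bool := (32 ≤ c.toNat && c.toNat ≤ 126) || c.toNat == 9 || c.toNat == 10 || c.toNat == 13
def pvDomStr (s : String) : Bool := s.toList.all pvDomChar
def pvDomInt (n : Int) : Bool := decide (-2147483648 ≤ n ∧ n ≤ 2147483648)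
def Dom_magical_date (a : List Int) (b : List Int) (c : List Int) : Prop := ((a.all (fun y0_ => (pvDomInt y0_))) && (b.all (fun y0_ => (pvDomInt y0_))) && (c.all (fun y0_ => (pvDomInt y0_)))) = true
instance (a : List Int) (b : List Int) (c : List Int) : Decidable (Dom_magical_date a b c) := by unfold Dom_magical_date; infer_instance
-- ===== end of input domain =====

-- B replaces A's innermost scan of c by a one-time index of c keyed by k%100 (asymptotically faster).


-- f"{i} {j} {k}"
def pvFmt (i j k : Int) : String :=
  PySem.Int.toStr i ++ " " ++ PySem.Int.toStr j ++ " " ++ PySem.Int.toStr k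

-- ===== PORT A =====
def magical_date (a : List Int) (b : List Int) (c : List Int) : List String :=
  a.foldl (fun l4 i =>
    b.foldl (fun l4 j =>
      c.foldl (fun l4 k =>
        if i * j == PySem.Int.mod k 100 then l4 ++ [pvFmt i j k] else l4) l4) l4) []

-- ===== PORT B =====
-- idx.setdefault(k % 100, []).append(k)  ==  idx[k%100] = idx.get(k%100, []) + [k]  ==  Dict.modify
def pvIdx (c : List Int) : PySem.Dict Int (List Int) :=
  c.foldl (fun d k => d.modify (PySem.Int.mod k 100) [] (· ++ [k])) PySem.Dict.empty

def magical_date_alt (a : List Int) (b : List Int) (c : List Int) : List String :=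
  let idx := pvIdx c
  a.foldl (fun l4 i =>
    b.foldl (fun l4 j =>
      (idx.getD (i * j) []).foldl (fun l4 k => l4 ++ [pvFmt i j k]) l4) l4) []

-- ===== PRECONDITION & SPEC =====
def Spec_magical_date (a : List Int) (b : List Int) (c : List Int) (out : List String) : Prop := out = magical_date_alt a b c
instance (a : List Int) (b : List Int) (c : List Int) (out : List String) : Decidable (Spec_magical_date a b c out) := by unfold Spec_magical_date; infer_instance

-- ===== CLAIM (what is proved, stated in full; the proofs are below) =====
def Claim_equal_magical_date : Prop := ∀ (a : List Int) (b : List Int) (c : List Int), Dom_magical_date a b c → Spec_magical_date a b c (magical_date a b c)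

-- ===== LEMMAS AND PROOFS =====

-- the bucket of p in the index is exactly the elements of c with k % 100 = p, in order
theorem pvIdx_getD (c : List Int) (p : Int) :
    (pvIdx c).getD p [] = c.filter (fun k => PySem.Int.mod k 100 == p) := by
  have h : pvIdx c
      = (c.map (fun k => (PySem.Int.mod k 100, k))).foldl
          (fun d q => d.modify q.1 [] (· ++ [q.2])) PySem.Dict.empty := by
    rw [List.foldl_map]
    rfl
  rw [h, PySem.Dict.getD_foldl_modify_append]
  simp [List.filter_map, Function.comp_def]

-- A's inner loop over c equals appending the formatted filtered bucket
theorem inner_eq (c : List Int) (i j : Int) (acc : List String) :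
    c.foldl (fun l4 k =>
        if i * j == PySem.Int.mod k 100 then l4 ++ [pvFmt i j k] else l4) acc
      = ((pvIdx c).getD (i * j) []).foldl (fun l4 k => l4 ++ [pvFmt i j k]) acc := by
  rw [PySem.List.foldl_append_if, PySem.List.foldl_append_singleton_eq_map, pvIdx_getD]
  have : (fun k => i * j == PySem.Int.mod k 100)
       = (fun k => PySem.Int.mod k 100 == i * j) := by
    funext k
    by_cases h : i * j = PySem.Int.mod k 100 <;> simp [h, eq_comm]
  rw [this]

-- ===== VERDICT (by name: the statement is the Claim_ definition above) =====
theorem magical_date_spec : Claim_equal_magical_date := by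
  intro a b c _
  unfold Spec_magical_date magical_date magical_date_alt
  simp only
  apply PySem.List.foldl_congr_mem
  intro acc i _
  apply PySem.List.foldl_congr_mem
  intro acc' j _
  exact inner_eq c i j acc'
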